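-- pv_equiv track=rewrite | github.com/Kenta-Han/TouristSpot | cgi-bin/analogy_image_map_d3/mypackage/other.py | Make_History_List
-- ===== SOURCE A (Python) =====
-- def Make_History_List(history):
--     all = []
--     spot = []
--     area = []
--     for i in range(len(history)):
--         temp = "%"+ history[i] +"%"
--         all.append(temp)
--         temp = 0
--     spot.append(all[0::2])
--     area.append(all[1::2])
--     return spot,area
-- ===== SOURCE B (Python) =====
-- def Make_History_List(history):
--     even = []
--     odd = []
--     for i, h in enumerate(history):
--         w = "%" + h + "%"
--         if i % 2 == 0:
--             even.append(w)
--         else: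
--             odd.append(w)
--     return [even], [odd]
-- ===== Notes on version B (the rewrite author's own statement) =====
-- stated objective: simpler
-- what changed: B partitions the wrapped strings into even/odd lists in a single enumerate pass instead of building a combined list by index and slicing it with [0::2]/[1::2].
import Mathlib
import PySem

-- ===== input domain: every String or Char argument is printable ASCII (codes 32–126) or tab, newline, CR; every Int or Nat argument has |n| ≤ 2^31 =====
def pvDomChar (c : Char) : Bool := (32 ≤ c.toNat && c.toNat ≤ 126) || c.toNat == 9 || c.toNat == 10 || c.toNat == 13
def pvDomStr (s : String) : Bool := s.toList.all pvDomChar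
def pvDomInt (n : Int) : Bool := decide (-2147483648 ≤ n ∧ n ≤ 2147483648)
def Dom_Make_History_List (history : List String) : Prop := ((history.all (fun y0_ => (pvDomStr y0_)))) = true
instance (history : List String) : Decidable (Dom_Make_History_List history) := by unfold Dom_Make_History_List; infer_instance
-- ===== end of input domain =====

-- B replaces A's build-then-extended-slice with a single even/odd partition pass (objective: simpler).

-- ===== PORT A =====
-- A: build all = ['%'+h+'%'] by an index loop, then spot = [all[0::2]], area = [all[1::2]].
-- step = 2 ≠ 0, so slice? is always some; .getD [] is exact (the default is never taken).
def Make_History_List (history : List String) : List (List String) × List (List String) :=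
  let all : List String :=
    (PySem.List.pyRange 0 (PySem.List.len history) 1).foldl
      (fun acc i => acc ++ ["%" ++ PySem.List.pyGetD history i "" ++ "%"]) []
  let spot : List (List String) := [] ++ [(PySem.List.slice? all (some 0) none 2).getD []]
  let area : List (List String) := [] ++ [(PySem.List.slice? all (some 1) none 2).getD []]
  (spot, area)

-- ===== PORT B =====
-- B: one enumerate pass, the wrapped string appended to 'even' or 'odd' by index parity.
def Make_History_List_alt (history : List String) : List (List String) × List (List String) :=
  let p : List String × List String :=
    (PySem.List.enumerate history).foldl
      (fun (acc : List String × List String) (ih : Int × String) =>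
        if PySem.Int.mod ih.1 2 == 0 then (acc.1 ++ ["%" ++ ih.2 ++ "%"], acc.2)
        else (acc.1, acc.2 ++ ["%" ++ ih.2 ++ "%"]))
      ([], [])
  ([p.1], [p.2])

-- ===== PRECONDITION & SPEC =====
def Spec_Make_History_List (history : List String) (out : List (List String) × List (List String)) : Prop := out = Make_History_List_alt history
instance (history : List String) (out : List (List String) × List (List String)) : Decidable (Spec_Make_History_List history out) := by unfold Spec_Make_History_List; infer_instance

-- ===== CLAIM (what is proved, stated in full; the proofs are below) =====
def Claim_equal_Make_History_List : Prop := ∀ (history : List String), Dom_Make_History_List history → Spec_Make_History_List history (Make_History_List history)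

-- ===== LEMMAS AND PROOFS =====

/-- every-second-element, starting with the head -/
def pvEvens {α : Type} : List α → List α
  | [] => []
  | [x] => [x]
  | x :: _ :: xs => x :: pvEvens xs

theorem pvEvens_cons {α : Type} (x : α) (xs : List α) :
    pvEvens (x :: xs) = x :: pvEvens xs.tail := by
  cases xs <;> rfl

/-- filterMap over `range n` picking indices s, s+2, … equals pvEvens of the drop,
    once n covers the rest of the list. -/
theorem pvFilterMap_step2 {α : Type} (n : Nat) :
    ∀ (xs : List α) (s : Nat), xs.length ≤ s + 2 * n →
      (List.range n).filterMap (fun k => xs[s + 2 * k]?) = pvEvens (xs.drop s) := by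
  induction n with
  | zero =>
    intro xs s h
    have : xs.drop s = [] := List.drop_eq_nil_of_le (by omega)
    simp [this, pvEvens]
  | succ n ih =>
    intro xs s h
    rw [List.range_succ_eq_map]
    simp only [List.filterMap_cons, List.filterMap_map]
    have hfun : ((fun k => xs[s + 2 * k]?) ∘ (fun i => i + 1)) =
        (fun k => xs[(s + 2) + 2 * k]?) := by
      funext k; simp only [Function.comp]; congr 1; omega
    rw [hfun, ih xs (s + 2) (by omega)]
    by_cases hs : s < xs.length
    · have h0 : xs[s + 2 * 0]? = some xs[s] := by
        simp [List.getElem?_eq_getElem hs]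
      have hdrop : xs.drop s = xs[s] :: xs.drop (s + 1) := List.drop_eq_getElem_cons hs
      rw [h0, hdrop, pvEvens_cons]
      simp [List.tail_drop]
    · have h0 : xs[s + 2 * 0]? = none := by
        simp; omega
      have hd1 : xs.drop s = [] := List.drop_eq_nil_of_le (by omega)
      have hd2 : xs.drop (s + 2) = [] := List.drop_eq_nil_of_le (by omega)
      rw [h0, hd1, hd2]

theorem pvSlice0 {α : Type} (xs : List α) :
    PySem.List.slice? xs (some 0) none 2 = some (pvEvens xs) := by
  simp only [PySem.List.slice?, PySem.List.sliceIndices]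
  norm_num
  have hfun : (fun k : Nat => xs[(2 * (k:Int)).toNat]?) = fun k => xs[0 + 2 * k]? := by
    funext k; congr 1; omega
  have hcnt : (if 0 < xs.length then (((xs.length:Int) + 2 - 1) / 2).toNat else 0)
      = (xs.length + 1) / 2 := by
    split <;> omega
  rw [hfun, hcnt, pvFilterMap_step2 ((xs.length + 1) / 2) xs 0 (by omega)]
  simp

theorem pvSlice1 {α : Type} (xs : List α) :
    PySem.List.slice? xs (some 1) none 2 = some (pvEvens xs.tail) := by
  simp only [PySem.List.slice?, PySem.List.sliceIndices]
  norm_num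
  rcases xs with _ | ⟨x, rest⟩
  · rfl
  · have hmin : min (1:Int) (((x :: rest).length:Int)) = 1 := by
      simp only [List.length_cons]; push_cast; omega
    rw [hmin]
    have hfun : (fun k : Nat => (x :: rest)[((1:Int) + 2 * (k:Int)).toNat]?) =
        fun k => (x :: rest)[1 + 2 * k]? := by
      funext k; congr 1 <;> omega
    have hcnt : (if 1 < (x :: rest).length
        then ((((x :: rest).length:Int) - 1 + 2 - 1) / 2).toNat else 0)
        = (rest.length + 1) / 2 := by
      simp only [List.length_cons]; split <;> push_cast <;> omega
    rw [hfun, hcnt, pvFilterMap_step2 ((rest.length + 1) / 2) (x :: rest) 1 (by simp; omega)]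
    simp

theorem pvFoldl_wrap (xs : List String) (acc : List String) :
    xs.foldl (fun a v => a ++ ["%" ++ v ++ "%"]) acc = acc ++ xs.map (fun v => "%" ++ v ++ "%") := by
  induction xs generalizing acc with
  | nil => simp
  | cons x xs ih => simp [List.foldl_cons, ih]

theorem pvA_all (history : List String) :
    (PySem.List.pyRange 0 (PySem.List.len history) 1).foldl
      (fun acc i => acc ++ ["%" ++ PySem.List.pyGetD history i "" ++ "%"]) []
    = history.map (fun v => "%" ++ v ++ "%") := by
  rw [PySem.List.foldl_pyRange_zero_pyGetD (f := fun a v => a ++ ["%" ++ v ++ "%"]) (d := "")]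
  rw [pvFoldl_wrap]
  rfl

theorem pvMod_even (m : Nat) : PySem.Int.mod (2 * (m:Int)) 2 = 0 := by
  simp [PySem.Int.mod]

theorem pvMod_odd (m : Nat) : PySem.Int.mod (2 * (m:Int) + 1) 2 = 1 := by
  simp [PySem.Int.mod]

theorem pvB_fold (xs : List String) :
    ∀ (m : Nat) (acc : List String × List String),
      (PySem.List.enumerate xs (2 * (m:Int))).foldl
        (fun (acc : List String × List String) (ih : Int × String) =>
          if PySem.Int.mod ih.1 2 == 0 then (acc.1 ++ ["%" ++ ih.2 ++ "%"], acc.2)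
          else (acc.1, acc.2 ++ ["%" ++ ih.2 ++ "%"]))
        acc
      = (acc.1 ++ pvEvens (xs.map (fun v => "%" ++ v ++ "%")),
         acc.2 ++ pvEvens ((xs.map (fun v => "%" ++ v ++ "%")).tail)) := by
  induction xs using pvEvens.induct with
  | case1 =>
    intro m acc
    simp [PySem.List.enumerate_nil, pvEvens]
  | case2 x =>
    intro m acc
    rw [PySem.List.enumerate_cons, PySem.List.enumerate_nil, List.foldl_cons, pvMod_even]
    simp [pvEvens]
  | case3 x y xs ih =>
    intro m acc
    have h2 : (2 * (m:Int)) + 1 + 1 = 2 * (((m + 1 : Nat)) : Int) := by push_cast; ring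
    rw [PySem.List.enumerate_cons, PySem.List.enumerate_cons, List.foldl_cons, List.foldl_cons, h2,
      ih (m + 1), pvMod_even, pvMod_odd]
    norm_num [pvEvens_cons, pvEvens, List.append_assoc]

-- ===== VERDICT (by name: the statement is the Claim_ definition above) =====
theorem Make_History_List_spec : Claim_equal_Make_History_List := by
  intro history _
  unfold Spec_Make_History_List Make_History_List Make_History_List_alt
  simp only [pvA_all, pvSlice0, pvSlice1, Option.getD_some, List.nil_append]
  have h := pvB_fold history 0 ([], [])
  simp only [Nat.cast_zero, mul_zero, List.nil_append] at h
  rw [h]
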